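-- pv_equiv track=rewrite | github.com/hhyunjooo/coding-test | 현주/프로그래머스/lv2/77885. 2개 이하로 다른 비트/2개 이하로 다른 비트.py | solution
-- ===== SOURCE A (Python) =====
-- def solution(numbers):
--     answer = []
--     for num in numbers:
--         if num%2==0:
--             answer.append(num+1)
--         else:
--             bin_num=bin(num)[2:]
--             bin_num="0"+bin_num
--             idx1=bin_num.rfind("0")
--             bin_num=list(bin_num)
--             bin_num[idx1]="1"
--             bin_num[idx1+1]="0"
--             str="".join(bin_num)
--             final_num=int(str, 2)
--             answer.append(final_num)
--     return answer
-- ===== SOURCE B (Python) =====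
-- def solution(numbers):
--     # closed-form bit trick: isolate the lowest unset bit with ~n & (n+1),
--     # then "set it and clear the bit below" is n + (mask >> 1)
--     return [n + 1 if n % 2 == 0 else n + ((~n & (n + 1)) >> 1) for n in numbers]
-- ===== Notes on version B (the rewrite author's own statement) =====
-- stated objective: simpler
-- what changed: The odd case no longer builds a binary string, rfind-scans it, edits two characters and reparses: B computes the same value in closed form with the bit trick n + ((~n & (n+1)) >> 1), which sets the lowest unset bit and clears the bit below it; Pre_ restricts to the task's natural domain, lists with no negative odd element, where A's textual editing of bin(num) and B's integer arithmetic disagree.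
-- outside the precondition, e.g. on solution([-5]): A returns [6], B returns [-3]
import Mathlib
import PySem

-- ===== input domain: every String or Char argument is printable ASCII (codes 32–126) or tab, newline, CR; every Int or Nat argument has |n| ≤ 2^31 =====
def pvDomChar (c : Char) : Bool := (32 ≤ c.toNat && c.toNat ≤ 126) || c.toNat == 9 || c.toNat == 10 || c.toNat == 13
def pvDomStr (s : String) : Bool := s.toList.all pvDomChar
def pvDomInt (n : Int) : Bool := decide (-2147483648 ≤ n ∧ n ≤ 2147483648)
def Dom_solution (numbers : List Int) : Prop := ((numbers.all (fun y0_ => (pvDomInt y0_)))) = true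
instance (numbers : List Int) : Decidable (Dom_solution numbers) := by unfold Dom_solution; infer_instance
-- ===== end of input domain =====

-- B replaces A's build-a-binary-string / rfind / edit-two-characters / reparse odd branch by the
-- closed-form bit step n + ((~n & (n+1)) >> 1) (objective: simpler; equal on the stated Pre_).

-- ===== PORT A =====
-- one step of reading a binary numeral left to right (the value accumulator of int(s, 2))
def pvStep (a : Option Nat) (c : Char) : Option Nat :=
  match a, (if c = '0' then some (0:Nat) else if c = '1' then some 1 else none) with
  | some a, some b => some (2*a + b)
  | _, _ => none

-- value of a nonempty string of binary digits (none = ValueError)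
def pvBitsVal? (cs : List Char) : Option Nat :=
  if cs.isEmpty then none else cs.foldl pvStep (some 0)

-- int(s, 2), ported by hand for exactly the strings this file's A constructs: binary digits with
-- an optional single lowercase '0b' prefix, never sign/space/underscore (bin() emits nothing
-- else). PySem.Int.ofCharsBase? computes the same value on such strings, but its digit reader is
-- private to the prelude, so the proofs below need this explicit step-for-step form.
def pvInt2? (cs : List Char) : Option Int :=
  match cs with
  | c0 :: c1 :: rest =>
      if c0 = '0' ∧ c1 = 'b' then (pvBitsVal? rest).map Int.ofNat
      else (pvBitsVal? (c0 :: c1 :: rest)).map Int.ofNat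
  | _ => (pvBitsVal? cs).map Int.ofNat

def solution (numbers : List Int) : List Int :=
  numbers.foldl (fun answer num =>
    if PySem.Int.mod num 2 = 0 then
      answer ++ [num + 1]
    else
      -- bin_num = bin(num)[2:]
      let bin_num := PySem.List.slice (PySem.Int.toBinChars0b num) (some 2) none
      -- bin_num = "0" + bin_num
      let bin_num := '0' :: bin_num
      -- idx1 = bin_num.rfind("0")
      let idx1 := PySem.Chars.rfind bin_num ['0']
      -- bin_num = list(bin_num); bin_num[idx1] = "1"; bin_num[idx1+1] = "0"
      -- (both indices are in range on every string this code builds, so pySetD = pySet?)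
      let bin_num := PySem.List.pySetD bin_num idx1 '1'
      let bin_num := PySem.List.pySetD bin_num (idx1 + 1) '0'
      -- final_num = int(str, 2)  (never a ValueError on these strings)
      let final_num := (pvInt2? bin_num).getD 0
      answer ++ [final_num]) []

-- ===== PORT B =====
def solution_alt (numbers : List Int) : List Int :=
  numbers.map (fun n =>
    if PySem.Int.mod n 2 = 0 then n + 1
    else n + ((PySem.Int.band (Int.not n) (n + 1)) >>> (1 : Nat)))

-- ===== PRECONDITION & SPEC =====
-- Pre_ restricts to the task's natural domain, numbers with no negative odd element: for a
-- negative odd num, A edits the text of bin(num), which begins with '-0b', while B computes on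
-- two's-complement integers, and the two results differ there (see the cited example).
def Pre_solution (numbers : List Int) : Prop :=
  ∀ n ∈ numbers, PySem.Int.mod n 2 = 0 ∨ 0 ≤ n
instance (numbers : List Int) : Decidable (Pre_solution numbers) := by
  unfold Pre_solution; infer_instance
def pvWitness_solution : List Int := [2, 7, 0, 2147483647, -4]

def Spec_solution (numbers : List Int) (out : List Int) : Prop := out = solution_alt numbers
instance (numbers : List Int) (out : List Int) : Decidable (Spec_solution numbers out) := by unfold Spec_solution; infer_instance

-- ===== CLAIM (what is proved, stated in full; the proofs are below) =====
def Claim_equal_solution : Prop := ∀ (numbers : List Int), Dom_solution numbers → Pre_solution numbers → Spec_solution numbers (solution numbers)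

-- ===== LEMMAS AND PROOFS =====

-- binary digits of m, most significant first (= Nat.toDigits 2 m, proved below)
def pvBits (m : Nat) : List Char :=
  if m < 2 then [if m = 1 then '1' else '0']
  else pvBits (m/2) ++ [if m % 2 = 1 then '1' else '0']
decreasing_by omega

-- number of trailing zero bits (0 on odd or zero input)
def pvTz (a : Nat) : Nat :=
  if a % 2 = 1 ∨ a = 0 then 0 else pvTz (a/2) + 1
decreasing_by omega

-- ---- bitwise facts ----
lemma pv_and_two_mul_add_one (x y : Nat) : (2*x+1) &&& 2*y = 2*(x &&& y) := by
  apply Nat.eq_of_testBit_eq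
  intro i
  cases i with
  | zero => simp
  | succ n => simp [Nat.testBit_succ, Nat.and_div_two,
      show (2*x+1)/2 = x from by omega, show 2*y/2 = y from by omega]

-- a & (a-1) clears the lowest set bit: the difference is 2^(trailing zeros)
lemma pv_lowbit (a : Nat) (h : 1 ≤ a) : a - (a &&& (a-1)) = 2 ^ pvTz a := by
  induction a using Nat.strong_induction_on with
  | _ a ih =>
    rcases Nat.even_or_odd a with he | ho
    · obtain ⟨c, hc⟩ := he
      have hc2 : a = 2 * c := by omega
      subst hc2
      have h1 : 1 ≤ c := by omega
      rw [show 2*c - 1 = 2*(c-1)+1 from by omega, Nat.and_comm,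
        pv_and_two_mul_add_one, Nat.and_comm]
      have hle := Nat.and_le_left (n := c) (m := c - 1)
      have ihc := ih c (by omega) h1
      have htz : pvTz (2*c) = pvTz c + 1 := by
        rw [pvTz, if_neg (by omega), show 2*c/2 = c from by omega]
      rw [htz, pow_succ]
      omega
    · obtain ⟨x, hx⟩ := ho
      subst hx
      have htz : pvTz (2*x+1) = 0 := by rw [pvTz, if_pos (Or.inl (by omega))]
      rw [show 2*x+1-1 = 2*x from rfl, pv_and_two_mul_add_one, Nat.and_self, htz]
      omega

lemma pv_tz_even (c : Nat) (hc : 1 ≤ c) : pvTz (2*c) = pvTz c + 1 := by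
  rw [pvTz, if_neg (by omega), show 2*c/2 = c from by omega]

lemma pv_tz_pos (k : Nat) (hk : k % 2 = 1) : 1 ≤ pvTz (k+1) := by
  rw [pvTz, if_neg (by omega)]; omega

-- ---- Nat.toDigits 2 = pvBits ----
lemma pv_toDigitsCore_acc (b : Nat) : ∀ (f n : Nat) (l : List Char),
    Nat.toDigitsCore b f n l = Nat.toDigitsCore b f n [] ++ l := by
  intro f
  induction f with
  | zero => intro n l; simp [Nat.toDigitsCore]
  | succ f ih =>
      intro n l
      simp only [Nat.toDigitsCore]
      by_cases h : n / b = 0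
      · simp [h]
      · simp only [h, if_false]
        rw [ih (n/b) (Nat.digitChar (n % b) :: l), ih (n/b) [Nat.digitChar (n % b)]]
        simp

lemma pv_toDigitsCore_fuel : ∀ (n f f' : Nat), n < f → n < f' →
    Nat.toDigitsCore 2 f n [] = Nat.toDigitsCore 2 f' n [] := by
  intro n
  induction n using Nat.strong_induction_on with
  | _ n ih =>
    intro f f' hf hf'
    obtain ⟨g, rfl⟩ : ∃ g, f = g + 1 := ⟨f - 1, by omega⟩
    obtain ⟨g', rfl⟩ : ∃ g', f' = g' + 1 := ⟨f' - 1, by omega⟩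
    simp only [Nat.toDigitsCore]
    by_cases h : n / 2 = 0
    · simp [h]
    · simp only [h, if_false]
      rw [pv_toDigitsCore_acc, pv_toDigitsCore_acc 2 g' (n/2)]
      rw [ih (n/2) (by omega) g g' (by omega) (by omega)]

lemma pv_toDigits_eq_pvBits (m : Nat) : Nat.toDigits 2 m = pvBits m := by
  induction m using Nat.strong_induction_on with
  | _ m ih =>
    rw [pvBits]
    by_cases h : m < 2
    · interval_cases m <;> simp [Nat.toDigits, Nat.toDigitsCore, Nat.digitChar]
    · simp only [h, if_false]
      rw [Nat.toDigits, Nat.toDigitsCore]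
      have h2 : ¬ m / 2 = 0 := by omega
      simp only [h2, if_false]
      rw [pv_toDigitsCore_acc, pv_toDigitsCore_fuel (m/2) m (m/2+1) (by omega) (by omega)]
      rw [show Nat.toDigitsCore 2 (m/2+1) (m/2) [] = Nat.toDigits 2 (m/2) from rfl, ih (m/2) (by omega)]
      congr 1
      rcases Nat.mod_two_eq_zero_or_one m with h0 | h0 <;> simp [h0, Nat.digitChar]

lemma pv_pvBits_binary (m : Nat) : ∀ c ∈ pvBits m, c = '0' ∨ c = '1' := by
  induction m using Nat.strong_induction_on with
  | _ m ih =>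
    rw [pvBits]
    by_cases h : m < 2
    · simp only [h, if_true]
      intro c hc
      by_cases h1 : m = 1 <;> simp [h1] at hc <;> simp [hc]
    · simp only [h, if_false]
      intro c hc
      rcases List.mem_append.mp hc with h1 | h1
      · exact ih (m/2) (by omega) c h1
      · by_cases h2 : m % 2 = 1 <;> simp [h2] at h1 <;> simp [h1]

-- ---- value of a binary numeral ----
lemma pv_foldl_pvStep_bits (m : Nat) : List.foldl pvStep (some 0) (pvBits m) = some m := by
  induction m using Nat.strong_induction_on with
  | _ m ih =>
    rw [pvBits]
    by_cases h : m < 2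
    · interval_cases m <;> simp [pvStep]
    · simp only [h, if_false]
      rw [List.foldl_append, ih (m/2) (by omega)]
      rcases Nat.mod_two_eq_zero_or_one m with h0 | h0 <;>
        simp [h0, pvStep] <;> omega

-- ---- s.rfind("0") on a list ending in a known character ----
lemma pv_go_append_ne (c : Char) (hc : c ≠ '0') : ∀ (x : Nat) (xs : List Char), x ≤ xs.length →
    PySem.Chars.rfind.go (xs ++ [c]) ['0'] x = PySem.Chars.rfind.go xs ['0'] x := by
  intro x
  induction x with
  | zero =>
      intro xs _
      rw [PySem.Chars.rfind.go, PySem.Chars.rfind.go]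
      cases xs with
      | nil => simp [List.isPrefixOf]; exact fun h => hc h.symm
      | cons a t => simp [List.isPrefixOf]
  | succ j ih =>
      intro xs hx
      rw [PySem.Chars.rfind.go, PySem.Chars.rfind.go]
      rw [List.drop_append_of_le_length (by omega)]
      have hdrop : (List.drop (j+1) xs).length = xs.length - (j+1) := List.length_drop ..
      by_cases he : j + 1 = xs.length
      · have h0 : List.drop (j+1) xs = [] := by
          apply List.eq_nil_of_length_eq_zero; omega
        rw [h0]
        simp only [List.nil_append, List.isPrefixOf]
        rw [if_neg (by simp; exact fun h => hc h.symm), if_neg (by simp)]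
        exact ih xs (by omega)
      · obtain ⟨a, t, ht⟩ : ∃ a t, List.drop (j+1) xs = a :: t := by
          cases hd : List.drop (j+1) xs with
          | nil => exfalso; rw [hd] at hdrop; simp at hdrop; omega
          | cons a t => exact ⟨a, t, rfl⟩
        rw [ht]
        simp only [List.cons_append, List.isPrefixOf]
        split
        · rfl
        · exact ih xs (by omega)

lemma pv_rfind_append_ne (xs : List Char) (c : Char) (hc : c ≠ '0') :
    PySem.Chars.rfind (xs ++ [c]) ['0'] = PySem.Chars.rfind xs ['0'] := by
  rw [PySem.Chars.rfind, PySem.Chars.rfind]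
  rw [List.length_append]
  simp only [List.length_cons, List.length_nil, Nat.zero_add]
  rw [PySem.Chars.rfind.go]
  rw [List.drop_eq_nil_of_le (by simp)]
  rw [if_neg (by simp [List.isPrefixOf])]
  exact pv_go_append_ne c hc xs.length xs le_rfl

lemma pv_rfind_append_zero (xs : List Char) :
    PySem.Chars.rfind (xs ++ ['0']) ['0'] = (xs.length : Int) := by
  rw [PySem.Chars.rfind, List.length_append]
  simp only [List.length_cons, List.length_nil, Nat.zero_add]
  rw [PySem.Chars.rfind.go]
  rw [List.drop_eq_nil_of_le (by simp)]
  rw [if_neg (by simp [List.isPrefixOf])]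
  cases hl : xs.length with
  | zero =>
      have h0 : xs = [] := List.eq_nil_of_length_eq_zero hl
      subst h0
      rw [PySem.Chars.rfind.go]
      simp [List.isPrefixOf]
  | succ j =>
      rw [PySem.Chars.rfind.go]
      rw [show j + 1 = xs.length from hl.symm, List.drop_left]
      simp [List.isPrefixOf, hl]

-- ---- the whole odd branch of A, on the string '0' :: pvBits m ----
lemma pv_main_odd : ∀ m : Nat, m % 2 = 1 →
    ∃ j : Nat, PySem.Chars.rfind ('0' :: pvBits m) ['0'] = (j : Int) ∧
      j + 2 ≤ ('0' :: pvBits m).length ∧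
      List.foldl pvStep (some 0) ((('0' :: pvBits m).set j '1').set (j+1) '0')
        = some (m + 2 ^ (pvTz (m+1) - 1)) := by
  intro m
  induction m using Nat.strong_induction_on with
  | _ m ih =>
    intro hm
    by_cases h1 : m = 1
    · subst h1
      have hb1 : pvBits 1 = ['1'] := by rw [pvBits]; decide
      have htz2 : pvTz 2 = 1 := by
        rw [pvTz, if_neg (by omega), show (2:Nat)/2 = 1 from rfl, pvTz, if_pos (by omega)]
      refine ⟨0, ?_, ?_, ?_⟩
      · rw [hb1]; decide
      · rw [hb1]; decide
      · rw [hb1, htz2]; decide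
    · -- m ≥ 3 odd
      have hm3 : 3 ≤ m := by omega
      have hsplit : pvBits m = pvBits (m/2) ++ ['1'] := by
        rw [pvBits, if_neg (by omega), if_pos hm]
      rcases Nat.mod_two_eq_zero_or_one (m/2) with hk | hk
      · -- m % 4 = 1 : the rightmost 0 of m is bit 1, the result is m+1
        set q := m/4 with hq
        have hq1 : 1 ≤ q := by omega
        have hm4 : m = 4*q + 1 := by omega
        have hs2 : pvBits (m/2) = pvBits q ++ ['0'] := by
          rw [pvBits, if_neg (by omega), if_neg (by omega),
            show m/2/2 = q from by omega]
        have hshape : ('0' :: pvBits m) = (('0' :: pvBits q) ++ ['0']) ++ ['1'] := by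
          rw [hsplit, hs2]; simp
        set L := (pvBits q).length with hL
        refine ⟨L + 1, ?_, ?_, ?_⟩
        · rw [hshape, pv_rfind_append_ne _ '1' (by decide), pv_rfind_append_zero]
          simp [hL]
        · rw [hshape]; simp [hL]
        · have hshape2 : ('0' :: pvBits m) = ('0' :: pvBits q) ++ ['0', '1'] := by
            rw [hsplit, hs2]; simp
          rw [hshape2]
          rw [List.set_append, if_neg (by simp [hL])]
          rw [show L + 1 - ('0' :: pvBits q).length = 0 from by simp [hL]]
          rw [List.set_append, if_neg (by simp [hL])]
          rw [show L + 1 + 1 - ('0' :: pvBits q).length = 1 from by simp [hL]]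
          simp only [List.set_cons_zero, List.set_cons_succ]
          rw [List.foldl_append]
          rw [show ('0' :: pvBits q) = ['0'] ++ pvBits q from rfl, List.foldl_append]
          rw [show List.foldl pvStep (some 0) ['0'] = some 0 from by simp [pvStep]]
          rw [pv_foldl_pvStep_bits]
          have htz : pvTz (m+1) = 1 := by
            rw [show m + 1 = 2*(2*q+1) from by omega, pv_tz_even _ (by omega),
              pvTz, if_pos (by omega)]
          rw [htz]
          simp [pvStep]
          omega
      · -- m % 4 = 3 : recurse on k = m/2
        set k := m/2 with hkdef
        have hk1 : k % 2 = 1 := hk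
        obtain ⟨j, hj1, hj2, hj3⟩ := ih k (by omega) hk1
        have hshape : ('0' :: pvBits m) = ('0' :: pvBits k) ++ ['1'] := by
          rw [hsplit]; simp
        refine ⟨j, ?_, ?_, ?_⟩
        · rw [hshape, pv_rfind_append_ne _ '1' (by decide), hj1]
        · rw [hshape]; simp at hj2 ⊢; omega
        · rw [hshape]
          rw [List.set_append, if_pos (by simp at hj2 ⊢; omega)]
          rw [List.set_append, if_pos (by simp at hj2 ⊢; omega)]
          rw [List.foldl_append, hj3]
          have ht1 : 1 ≤ pvTz (k+1) := pv_tz_pos k hk1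
          have htz : pvTz (m+1) = pvTz (k+1) + 1 := by
            rw [show m + 1 = 2*(k+1) from by omega, pv_tz_even _ (by omega)]
          rw [htz]
          simp [pvStep]
          have hpow : 2^(pvTz (k+1)) = 2 * 2^(pvTz (k+1) - 1) := by
            rw [← pow_succ']
            congr 1
            omega
          omega

-- ---- B's odd branch ----
lemma pv_band_not (m : Nat) :
    PySem.Int.band (Int.not (m : Int)) ((m : Int) + 1) = (((m+1) - ((m+1) &&& m) : Nat) : Int) := by
  have h1 : Int.not (m : Int) = Int.negSucc m := rfl
  rw [h1, PySem.Int.band]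
  rw [if_neg (by simp), if_pos (by positivity)]
  norm_num

lemma pv_alt_odd (m : Nat) (hm : m % 2 = 1) :
    (m : Int) + ((PySem.Int.band (Int.not (m : Int)) ((m : Int) + 1)) >>> (1 : Nat))
      = ((m + 2 ^ (pvTz (m+1) - 1) : Nat) : Int) := by
  rw [pv_band_not]
  have h1 : (m+1) &&& m = (m+1) &&& ((m+1) - 1) := by norm_num
  rw [h1, pv_lowbit (m+1) (by omega)]
  have ht := pv_tz_pos m hm
  have h3 : ∀ s : Nat, 2 ^ (s+1) >>> 1 = 2 ^ s := by
    intro s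
    rw [Nat.shiftRight_eq_div_pow, pow_one, pow_succ]
    omega
  obtain ⟨s, hs⟩ : ∃ s, pvTz (m+1) = s + 1 := ⟨pvTz (m+1) - 1, by omega⟩
  rw [hs]
  simp only [Nat.add_sub_cancel]
  have h4 : ((2^(s+1) : Nat) : Int) >>> (1:Nat) = ((2^(s+1) >>> 1 : Nat) : Int) := by simp
  rw [h4, h3 s]
  push_cast
  ring

-- ---- A's odd branch reduces to the same value ----
lemma pv_slice_two (a b : Char) (l : List Char) :
    PySem.List.slice (a :: b :: l) (some 2) none = l := by
  simp [PySem.List.slice, PySem.List.clampIdx]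

lemma pv_int2_binary (cs : List Char) (h : ∀ c ∈ cs, c = '0' ∨ c = '1') :
    pvInt2? cs = (pvBitsVal? cs).map Int.ofNat := by
  match cs with
  | [] => rfl
  | [c] => rfl
  | c0 :: c1 :: rest =>
      rw [pvInt2?]
      rw [if_neg ?_]
      rintro ⟨-, h1⟩
      rcases h c1 (by simp) with h2 | h2 <;> rw [h1] at h2 <;> exact absurd h2 (by decide)

lemma pv_a_odd (m : Nat) (hm : m % 2 = 1) :
    (pvInt2? (PySem.List.pySetD
        (PySem.List.pySetD ('0' :: PySem.List.slice (PySem.Int.toBinChars0b (m : Int)) (some 2) none)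
          (PySem.Chars.rfind ('0' :: PySem.List.slice (PySem.Int.toBinChars0b (m : Int)) (some 2) none) ['0']) '1')
        (PySem.Chars.rfind ('0' :: PySem.List.slice (PySem.Int.toBinChars0b (m : Int)) (some 2) none) ['0'] + 1) '0')).getD 0
      = ((m + 2 ^ (pvTz (m+1) - 1) : Nat) : Int) := by
  have hb : PySem.Int.toBinChars0b (m : Int) = '0' :: 'b' :: pvBits m := by
    rw [PySem.Int.toBinChars0b, if_neg (not_lt.mpr (Int.natCast_nonneg m)), Int.toNat_natCast,
      pv_toDigits_eq_pvBits]
  rw [hb, pv_slice_two]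
  obtain ⟨j, hj1, hj2, hj3⟩ := pv_main_odd m hm
  rw [hj1]
  rw [PySem.List.pySetD_natCast]
  rw [show ((j : Int) + 1) = ((j + 1 : Nat) : Int) from by push_cast; ring]
  rw [PySem.List.pySetD_natCast]
  have hbin : ∀ c ∈ (((('0' :: pvBits m)).set j '1').set (j+1) '0'), c = '0' ∨ c = '1' := by
    intro c hc
    rcases List.mem_or_eq_of_mem_set hc with hc1 | hc1
    · rcases List.mem_or_eq_of_mem_set hc1 with hc2 | hc2
      · rcases List.mem_cons.mp hc2 with hc3 | hc3
        · exact Or.inl hc3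
        · exact pv_pvBits_binary m c hc3
      · exact Or.inr hc2
    · exact Or.inl hc1
  rw [pv_int2_binary _ hbin]
  have hne : ((('0' :: pvBits m)).set j '1').set (j+1) '0' ≠ [] := by
    intro h
    have := congrArg List.length h
    simp at this
  rw [pvBitsVal?, if_neg (by simp [List.isEmpty_iff, hne]), hj3]
  rfl

-- A's loop body appends one value per element; name that value
def pvAElem (num : Int) : Int :=
  if PySem.Int.mod num 2 = 0 then num + 1
  else
    let bin_num := PySem.List.slice (PySem.Int.toBinChars0b num) (some 2) none
    let bin_num := '0' :: bin_num
    let idx1 := PySem.Chars.rfind bin_num ['0']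
    let bin_num := PySem.List.pySetD bin_num idx1 '1'
    let bin_num := PySem.List.pySetD bin_num (idx1 + 1) '0'
    (pvInt2? bin_num).getD 0

lemma pv_solution_eq_map (numbers : List Int) :
    solution numbers = numbers.map pvAElem := by
  rw [solution]
  rw [show (fun (answer : List Int) (num : Int) =>
      if PySem.Int.mod num 2 = 0 then
        answer ++ [num + 1]
      else
        let bin_num := PySem.List.slice (PySem.Int.toBinChars0b num) (some 2) none
        let bin_num := '0' :: bin_num
        let idx1 := PySem.Chars.rfind bin_num ['0']
        let bin_num := PySem.List.pySetD bin_num idx1 '1'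
        let bin_num := PySem.List.pySetD bin_num (idx1 + 1) '0'
        let final_num := (pvInt2? bin_num).getD 0
        answer ++ [final_num]) = fun answer num => answer ++ [pvAElem num] from by
    funext answer num
    rw [pvAElem]
    split_ifs <;> rfl]
  rw [PySem.List.foldl_append_singleton_eq_map]
  simp

lemma pv_elem_eq (n : Int) (h : PySem.Int.mod n 2 = 0 ∨ 0 ≤ n) :
    pvAElem n = (if PySem.Int.mod n 2 = 0 then n + 1
      else n + ((PySem.Int.band (Int.not n) (n + 1)) >>> (1 : Nat))) := by
  by_cases he : PySem.Int.mod n 2 = 0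
  · rw [pvAElem, if_pos he, if_pos he]
  · have hn : 0 ≤ n := h.resolve_left he
    obtain ⟨m, rfl⟩ : ∃ m : Nat, n = (m : Int) := ⟨n.toNat, (Int.toNat_of_nonneg hn).symm⟩
    have hm : m % 2 = 1 := by
      have hcast : PySem.Int.mod (m : Int) 2 = ((m % 2 : Nat) : Int) := by
        exact_mod_cast PySem.Int.mod_natCast m 2
      rcases Nat.mod_two_eq_zero_or_one m with h0 | h0
      · exact absurd (by rw [hcast, h0]; rfl) he
      · exact h0
    rw [pvAElem, if_neg he, if_neg he]
    simp only []
    rw [pv_a_odd m hm, pv_alt_odd m hm]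

-- ===== VERDICT (by name: the statement is the Claim_ definition above) =====
theorem solution_spec : Claim_equal_solution := by
  intro numbers _hdom hpre
  unfold Spec_solution solution_alt
  rw [pv_solution_eq_map]
  exact List.map_congr_left fun n hn => pv_elem_eq n (hpre n hn)
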